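-- pv_equiv track=rewrite | github.com/Abir-Ashab/Mitre-Dataset | Log Labeler/main.py | filter_system_log
-- ===== SOURCE A (Python) =====
-- def filter_system_log(event):
--     """Remove unnecessary fields from system logs while preserving structure and labels."""
--     import copy
--     filtered = copy.deepcopy(event)
--
--     # Remove unnecessary fields from winlog.event_data (metadata, not behavior traces)
--     if 'winlog' in filtered and 'event_data' in filtered['winlog']:
--         unnecessary_fields = [
--             'UtcTime',  # Duplicates root timestamp
--             'RuleName',  # Sysmon rule metadata
--             'Hashes',  # Too detailed for initial filtering
--             'IntegrityLevel',  # Windows metadata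
--             'TerminalSessionId',  # Windows session metadata
--             'ParentProcessGuid', 'ParentProcessId',  # Redundant with ParentImage
--             'ParentCommandLine',  # Often too verbose
--             'CurrentDirectory',  # Low signal
--             'SourceHostname', 'DestinationHostname',  # Redundant with IPs
--             'SourceIsIpv6', 'DestinationIsIpv6',  # Can be inferred from IP
--             'SourcePortName', 'DestinationPortName',  # Redundant with port number
--             'Initiated'  # Usually always true
--         ]
--         for field in unnecessary_fields:
--             filtered['winlog']['event_data'].pop(field, None)
--
--     # Remove unnecessary top-level fields from winlog (infrastructure metadata)
--     if 'winlog' in filtered: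
--         unnecessary_winlog_fields = [
--             'api', 'computer_name', 'opcode', 'process', 'provider_guid',
--             'provider_name', 'record_id', 'version', 'channel', 'keywords',
--             'task',  # Verbose description, duplicates event_id
--             'user'  # Contains SID and domain, redundant with event_data.User
--         ]
--         for field in unnecessary_winlog_fields:
--             filtered['winlog'].pop(field, None)
--
--     # Remove top-level infrastructure fields (not behavior traces)
--     unnecessary_top_fields = [
--         '@timestamp',  # Use 'timestamp' instead
--         '@version',  # Logstash version
--         'message',  # Duplicates event_data in string format
--         'log',  # Log metadata
--         'ecs',  # ECS schema version
--         'host',  # Use host_id instead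
--         'agent',  # Use agent_id instead
--         'tags',  # Logstash processing tags
--         'event'  # Contains duplicates like event.original, event.created
--     ]
--     for field in unnecessary_top_fields:
--         filtered.pop(field, None)
--
--     return filtered
-- ===== SOURCE B (Python) =====
-- def filter_system_log(event):
--     """Remove unnecessary fields from system logs while preserving structure and labels."""
--     import copy
--
--     ED_DROP = {
--         'UtcTime', 'RuleName', 'Hashes', 'IntegrityLevel', 'TerminalSessionId',
--         'ParentProcessGuid', 'ParentProcessId', 'ParentCommandLine',
--         'CurrentDirectory', 'SourceHostname', 'DestinationHostname',
--         'SourceIsIpv6', 'DestinationIsIpv6', 'SourcePortName',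
--         'DestinationPortName', 'Initiated',
--     }
--     WL_DROP = {
--         'api', 'computer_name', 'opcode', 'process', 'provider_guid',
--         'provider_name', 'record_id', 'version', 'channel', 'keywords',
--         'task', 'user',
--     }
--     TOP_DROP = {
--         '@timestamp', '@version', 'message', 'log', 'ecs', 'host',
--         'agent', 'tags', 'event',
--     }
--
--     def clean_winlog(winlog):
--         return {
--             k: ({ek: ev for ek, ev in v.items() if ek not in ED_DROP}
--                 if k == 'event_data' else copy.deepcopy(v))
--             for k, v in winlog.items() if k not in WL_DROP
--         }
--
--     return {
--         k: (clean_winlog(v) if k == 'winlog' else copy.deepcopy(v))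
--         for k, v in event.items() if k not in TOP_DROP
--     }
-- ===== Notes on version B (the rewrite author's own statement) =====
-- stated objective: simpler
-- what changed: B rebuilds the result with one blacklist-filtering dict comprehension per level (winlog and event_data handled by a nested comprehension) instead of A's deepcopy followed by three pop loops over the mutable copy.
import Mathlib
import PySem

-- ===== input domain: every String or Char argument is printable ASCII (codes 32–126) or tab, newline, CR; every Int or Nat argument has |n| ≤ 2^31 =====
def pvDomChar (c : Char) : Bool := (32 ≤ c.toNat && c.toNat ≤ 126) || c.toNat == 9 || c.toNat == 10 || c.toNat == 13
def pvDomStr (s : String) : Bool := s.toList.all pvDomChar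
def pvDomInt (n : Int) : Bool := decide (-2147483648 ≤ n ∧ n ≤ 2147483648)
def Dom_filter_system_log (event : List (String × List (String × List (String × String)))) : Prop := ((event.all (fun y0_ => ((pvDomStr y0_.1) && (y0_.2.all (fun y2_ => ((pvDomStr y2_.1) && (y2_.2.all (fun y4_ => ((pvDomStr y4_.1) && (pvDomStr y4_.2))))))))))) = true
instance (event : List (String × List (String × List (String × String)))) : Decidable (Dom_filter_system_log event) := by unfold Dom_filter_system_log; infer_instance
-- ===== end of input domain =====

-- B rebuilds the result by whitelist filtering (one comprehension pass per level) instead of A's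
-- deepcopy-then-pop loops; objective: simpler. Return-value equivalence only (neither mutates its input).

-- ===== PORT A =====
-- A's three blacklists, in A's order.
def pvAEdFields : List String :=
  ["UtcTime", "RuleName", "Hashes", "IntegrityLevel", "TerminalSessionId",
   "ParentProcessGuid", "ParentProcessId", "ParentCommandLine", "CurrentDirectory",
   "SourceHostname", "DestinationHostname", "SourceIsIpv6", "DestinationIsIpv6",
   "SourcePortName", "DestinationPortName", "Initiated"]
def pvAWlFields : List String :=
  ["api", "computer_name", "opcode", "process", "provider_guid", "provider_name",
   "record_id", "version", "channel", "keywords", "task", "user"]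
def pvATopFields : List String :=
  ["@timestamp", "@version", "message", "log", "ecs", "host", "agent", "tags", "event"]

-- Python's in-place `filtered['winlog']['event_data'].pop(field, None)` mutates the nested dict the
-- outer dict still holds; with immutable PySem.Dict this is modeled by re-inserting the mutated inner
-- dict at its key (insert overwrites in place) — exact for dicts, whose keys are unique (Pre_).
def filter_system_log (event : List (String × List (String × List (String × String)))) : List (String × List (String × List (String × String))) :=
  let filtered := PySem.Dict.mk event
  let filtered :=
    if filtered.contains "winlog" && (PySem.Dict.mk (filtered.getD "winlog" [])).contains "event_data" then
      let wl := PySem.Dict.mk (filtered.getD "winlog" [])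
      let ed := PySem.Dict.mk (wl.getD "event_data" [])
      let ed := pvAEdFields.foldl (fun d f => d.erase f) ed   -- pop(field, None): discard the value
      filtered.insert "winlog" ((wl.insert "event_data" ed.items).items)
    else filtered
  let filtered :=
    if filtered.contains "winlog" then
      let wl := PySem.Dict.mk (filtered.getD "winlog" [])
      filtered.insert "winlog" ((pvAWlFields.foldl (fun d f => d.erase f) wl).items)
    else filtered
  (pvATopFields.foldl (fun d f => d.erase f) filtered).items

-- ===== PORT B =====
-- B's blacklists are Python set literals.
def pvEdDrop : PySem.Set String := PySem.Set.ofList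
  ["UtcTime", "RuleName", "Hashes", "IntegrityLevel", "TerminalSessionId",
   "ParentProcessGuid", "ParentProcessId", "ParentCommandLine", "CurrentDirectory",
   "SourceHostname", "DestinationHostname", "SourceIsIpv6", "DestinationIsIpv6",
   "SourcePortName", "DestinationPortName", "Initiated"]
def pvWlDrop : PySem.Set String := PySem.Set.ofList
  ["api", "computer_name", "opcode", "process", "provider_guid", "provider_name",
   "record_id", "version", "channel", "keywords", "task", "user"]
def pvTopDrop : PySem.Set String := PySem.Set.ofList
  ["@timestamp", "@version", "message", "log", "ecs", "host", "agent", "tags", "event"]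

-- {k: (filtered event_data if k=='event_data' else v) for k, v in winlog.items() if k not in WL_DROP}
def pvCleanWinlog (wl : List (String × List (String × String))) : List (String × List (String × String)) :=
  wl.filterMap (fun q =>
    if pvWlDrop.contains q.1 then none
    else some (q.1, if q.1 == "event_data" then q.2.filter (fun r => !pvEdDrop.contains r.1) else q.2))

def filter_system_log_alt (event : List (String × List (String × List (String × String)))) : List (String × List (String × List (String × String))) :=
  event.filterMap (fun p =>
    if pvTopDrop.contains p.1 then none
    else some (p.1, if p.1 == "winlog" then pvCleanWinlog p.2 else p.2))

-- ===== PRECONDITION & SPEC =====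
-- Pre_ excludes association lists with duplicate keys (at the top level or inside the 'winlog'
-- value): they do not encode a Python dict, so neither behaviour on them is specified by A.
def Pre_filter_system_log (event : List (String × List (String × List (String × String)))) : Prop :=
  (event.map Prod.fst).Nodup ∧ ∀ p ∈ event, p.1 = "winlog" → (p.2.map Prod.fst).Nodup
instance (event : List (String × List (String × List (String × String)))) : Decidable (Pre_filter_system_log event) := by unfold Pre_filter_system_log; infer_instance

def pvWitness_filter_system_log : (List (String × List (String × List (String × String)))) :=
  [("winlog", [("event_data", [("UtcTime", "t"), ("Image", "x.exe")]), ("api", []), ("keep", [])]),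
   ("@timestamp", []), ("timestamp", [])]

def Spec_filter_system_log (event : List (String × List (String × List (String × String)))) (out : List (String × List (String × List (String × String)))) : Prop := out = filter_system_log_alt event
instance (event : List (String × List (String × List (String × String)))) (out : List (String × List (String × List (String × String)))) : Decidable (Spec_filter_system_log event out) := by unfold Spec_filter_system_log; infer_instance

-- ===== CLAIM (what is proved, stated in full; the proofs are below) =====
def Claim_equal_filter_system_log : Prop := ∀ (event : List (String × List (String × List (String × String)))), Dom_filter_system_log event → Pre_filter_system_log event → Spec_filter_system_log event (filter_system_log event)

-- ===== LEMMAS AND PROOFS =====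

-- erase-fold over a blacklist is one filter by the whole blacklist
theorem pv_eraseFold_items {ν : Type} (L : List String) (d : PySem.Dict String ν) :
    (L.foldl (fun d f => d.erase f) d).items = d.items.filter (fun p => !L.contains p.1) := by
  induction L generalizing d with
  | nil => simp
  | cons f L ih =>
      rw [List.foldl_cons, ih]
      simp only [PySem.Dict.erase, List.filter_filter]
      apply List.filter_congr
      intro p _
      rw [List.contains_cons, Bool.not_or, Bool.and_comm]

-- first-match lookup in a run whose earlier keys all differ from k
theorem pv_find_mid {ν : Type} (k : String) (xs ys : List (String × ν)) (v : ν)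
    (hx : k ∉ xs.map Prod.fst) :
    (xs ++ (k, v) :: ys).find? (fun p => p.1 == k) = some (k, v) := by
  induction xs with
  | nil => simp
  | cons a xs ih =>
      have h1 : k ≠ a.1 := fun h => hx (by simp [h])
      have h2 : k ∉ xs.map Prod.fst := fun h => hx (by simp [h])
      simp only [List.cons_append, List.find?_cons]
      rw [show (a.1 == k) = false from by rw [beq_eq_false_iff_ne]; exact Ne.symm h1]
      exact ih h2

theorem pv_contains_mid {ν : Type} (k : String) (xs ys : List (String × ν)) (v : ν) :
    (PySem.Dict.mk (xs ++ (k, v) :: ys)).contains k = true := by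
  simp [PySem.Dict.contains]

theorem pv_getD_mid {ν : Type} (k : String) (xs ys : List (String × ν)) (v d0 : ν)
    (hx : k ∉ xs.map Prod.fst) :
    (PySem.Dict.mk (xs ++ (k, v) :: ys)).getD k d0 = v := by
  simp [PySem.Dict.getD, PySem.Dict.get?, pv_find_mid k xs ys v hx]

-- overwriting at key k touches nothing in a run of other keys
theorem pv_map_replace_id {ν : Type} (k : String) (w : ν) (xs : List (String × ν))
    (hx : k ∉ xs.map Prod.fst) :
    xs.map (fun p => if p.1 == k then (k, w) else p) = xs := by
  induction xs with
  | nil => rfl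
  | cons a xs ih =>
      have h1 : k ≠ a.1 := fun h => hx (by simp [h])
      have h2 : k ∉ xs.map Prod.fst := fun h => hx (by simp [h])
      simp only [List.map_cons, ih h2]
      rw [show (a.1 == k) = false from by rw [beq_eq_false_iff_ne]; exact Ne.symm h1]
      simp

-- insert at the (unique) key k of a split dict rewrites exactly the middle entry
theorem pv_insert_mid {ν : Type} (k : String) (xs ys : List (String × ν)) (v w : ν)
    (hx : k ∉ xs.map Prod.fst) (hy : k ∉ ys.map Prod.fst) :
    (PySem.Dict.mk (xs ++ (k, v) :: ys)).insert k w = PySem.Dict.mk (xs ++ (k, w) :: ys) := by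
  apply PySem.Dict.ext
  simp only [PySem.Dict.insert, pv_contains_mid, if_pos]
  simp only [List.map_append, List.map_cons, BEq.rfl, if_true,
             pv_map_replace_id k w xs hx, pv_map_replace_id k w ys hy]

-- B-shaped comprehension over a run with no special key is a plain filter
theorem pv_filterMap_no_key {α : Type} (k : String) (drop : String → Bool) (f : α → α)
    (l : List (String × α)) (h : ∀ p ∈ l, p.1 ≠ k) :
    l.filterMap (fun p => if drop p.1 then none
                          else some (p.1, if p.1 == k then f p.2 else p.2))
      = l.filter (fun p => !drop p.1) := by
  induction l with
  | nil => rfl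
  | cons a l ih =>
      obtain ⟨a1, a2⟩ := a
      have ha : a1 ≠ k := h (a1, a2) List.mem_cons_self
      have hk : (a1 == k) = false := by rw [beq_eq_false_iff_ne]; exact ha
      have ih' := ih (fun p hp => h p (List.mem_cons_of_mem (a1, a2) hp))
      by_cases hd : drop a1
      · simp only [List.filterMap_cons, List.filter_cons, hd, if_true, Bool.not_true,
                   Bool.false_eq_true, if_false, ih']
      · have hd' : drop a1 = false := by simpa using hd
        simp only [List.filterMap_cons, List.filter_cons, hd', Bool.false_eq_true, if_false,
                   Bool.not_false, if_true, hk, ih']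

-- the comprehension over xs ++ (k, v) :: ys: k kept and transformed, others plain
theorem pv_filterMap_mid {α : Type} (k : String) (drop : String → Bool) (f : α → α)
    (xs ys : List (String × α)) (v : α)
    (hx : ∀ p ∈ xs, p.1 ≠ k) (hy : ∀ p ∈ ys, p.1 ≠ k)
    (hk : drop k = false) :
    (xs ++ (k, v) :: ys).filterMap (fun p => if drop p.1 then none
                          else some (p.1, if p.1 == k then f p.2 else p.2))
      = xs.filter (fun p => !drop p.1) ++ (k, f v) :: ys.filter (fun p => !drop p.1) := by
  rw [List.filterMap_append, pv_filterMap_no_key k drop f xs hx, List.filterMap_cons]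
  simp only [hk, Bool.false_eq_true, if_false, BEq.rfl, if_true,
             pv_filterMap_no_key k drop f ys hy]

-- keys of a Nodup run around k: no k on either side
theorem pv_nodup_sides {ν : Type} (k : String) (xs ys : List (String × ν)) (v : ν)
    (h : ((xs ++ (k, v) :: ys).map Prod.fst).Nodup) :
    k ∉ xs.map Prod.fst ∧ k ∉ ys.map Prod.fst := by
  simp only [List.map_append, List.map_cons, List.nodup_append, List.nodup_cons] at h
  exact ⟨fun hm => h.2.2 k hm k (by simp) rfl, h.2.1.1⟩

-- the three blacklists agree between the two ports
theorem pv_top_pred (s : String) : pvTopDrop.contains s = pvATopFields.contains s := by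
  rw [show (pvTopDrop : List String) = pvATopFields from by decide]; rfl
theorem pv_wl_pred (s : String) : pvWlDrop.contains s = pvAWlFields.contains s := by
  rw [show (pvWlDrop : List String) = pvAWlFields from by decide]; rfl
theorem pv_ed_pred (s : String) : pvEdDrop.contains s = pvAEdFields.contains s := by
  rw [show (pvEdDrop : List String) = pvAEdFields from by decide]; rfl

-- A's rewritten winlog value (event_data present) is exactly B's pvCleanWinlog
theorem pv_winlog_clean_pos (wl : List (String × List (String × String)))
    (hwl : (wl.map Prod.fst).Nodup)
    (hed : (PySem.Dict.mk wl).contains "event_data" = true) :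
    (((PySem.Dict.mk wl).insert "event_data"
        ((pvAEdFields.foldl (fun d f => d.erase f)
           (PySem.Dict.mk ((PySem.Dict.mk wl).getD "event_data" []))).items)).items).filter
      (fun p => !pvAWlFields.contains p.1) = pvCleanWinlog wl := by
  have hmem : "event_data" ∈ wl.map Prod.fst := by
    simp only [PySem.Dict.contains, List.any_eq_true] at hed
    obtain ⟨p, hp, hpk⟩ := hed
    exact List.mem_map.mpr ⟨p, hp, by simpa using hpk⟩
  obtain ⟨a, ha, hak⟩ := List.mem_map.mp hmem
  obtain ⟨us, vs, huv⟩ := List.append_of_mem ha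
  obtain ⟨k0, ed⟩ := a
  simp only at hak
  subst hak
  subst huv
  obtain ⟨hu, hv⟩ := pv_nodup_sides _ us vs ed hwl
  rw [pv_getD_mid _ us vs ed [] hu, pv_eraseFold_items,
      pv_insert_mid _ us vs ed _ hu hv]
  rw [show (PySem.Dict.mk (us ++ ("event_data", List.filter (fun p => !pvAEdFields.contains p.1) ed) :: vs)).items
        = us ++ ("event_data", List.filter (fun p => !pvAEdFields.contains p.1) ed) :: vs from rfl]
  rw [List.filter_append, List.filter_cons]
  rw [pvCleanWinlog,
      pv_filterMap_mid "event_data" (fun s => pvWlDrop.contains s)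
        (fun ed => ed.filter (fun r => !pvEdDrop.contains r.1)) us vs ed
        (fun p hp h => hu (List.mem_map.mpr ⟨p, hp, h⟩))
        (fun p hp h => hv (List.mem_map.mpr ⟨p, hp, h⟩))
        (by decide)]
  simp only [pv_wl_pred, pv_ed_pred]
  norm_num
  decide

-- no event_data in winlog: A only drops the winlog blacklist, which is pvCleanWinlog
theorem pv_winlog_clean_neg (wl : List (String × List (String × String)))
    (hed : (PySem.Dict.mk wl).contains "event_data" = false) :
    wl.filter (fun p => !pvAWlFields.contains p.1) = pvCleanWinlog wl := by
  have hne : ∀ p ∈ wl, p.1 ≠ "event_data" := by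
    intro p hp hk
    have hcon : (PySem.Dict.mk wl).contains "event_data" = true := by
      simp only [PySem.Dict.contains, List.any_eq_true]
      exact ⟨p, hp, by simp [hk]⟩
    rw [hcon] at hed
    exact absurd hed (by decide)
  rw [pvCleanWinlog, pv_filterMap_no_key "event_data" (fun s => pvWlDrop.contains s) _ wl hne]
  simp only [pv_wl_pred]

-- ===== VERDICT (by name: the statement is the Claim_ definition above) =====
theorem filter_system_log_spec : Claim_equal_filter_system_log := by
  intro event _ hpre
  obtain ⟨hK, hW⟩ := hpre
  unfold Spec_filter_system_log
  by_cases hwin : "winlog" ∈ event.map Prod.fst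
  · -- winlog present: split event around its unique occurrence
    obtain ⟨a, ha, hak⟩ := List.mem_map.mp hwin
    obtain ⟨xs, ys, hxy⟩ := List.append_of_mem ha
    obtain ⟨k0, wl⟩ := a
    simp only at hak
    subst hak
    subst hxy
    obtain ⟨hx, hy⟩ := pv_nodup_sides _ xs ys wl hK
    have hwl : (wl.map Prod.fst).Nodup := hW _ ha rfl
    have hxk : ∀ p ∈ xs, p.1 ≠ "winlog" := fun p hp h => hx (List.mem_map.mpr ⟨p, hp, h⟩)
    have hyk : ∀ p ∈ ys, p.1 ≠ "winlog" := fun p hp h => hy (List.mem_map.mpr ⟨p, hp, h⟩)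
    rw [filter_system_log_alt,
        pv_filterMap_mid "winlog" (fun s => pvTopDrop.contains s) pvCleanWinlog xs ys wl hxk hyk (by decide)]
    rw [filter_system_log]
    simp only [pv_contains_mid, pv_getD_mid _ xs ys wl [] hx, Bool.true_and]
    by_cases hed : (PySem.Dict.mk wl).contains "event_data"
    · rw [if_pos hed, pv_insert_mid _ xs ys wl _ hx hy]
      simp only [pv_contains_mid, pv_getD_mid _ xs ys _ [] hx, if_true]
      rw [pv_insert_mid _ xs ys _ _ hx hy, pv_eraseFold_items]
      rw [show (PySem.Dict.mk (xs ++ ("winlog", ((pvAWlFields.foldl (fun d f => d.erase f) (PySem.Dict.mk (((PySem.Dict.mk wl).insert "event_data" ((pvAEdFields.foldl (fun d f => d.erase f) (PySem.Dict.mk ((PySem.Dict.mk wl).getD "event_data" []))).items)).items))).items)) :: ys)).items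
            = xs ++ ("winlog", ((pvAWlFields.foldl (fun d f => d.erase f) (PySem.Dict.mk (((PySem.Dict.mk wl).insert "event_data" ((pvAEdFields.foldl (fun d f => d.erase f) (PySem.Dict.mk ((PySem.Dict.mk wl).getD "event_data" []))).items)).items))).items)) :: ys from rfl]
      rw [List.filter_append, List.filter_cons, pv_eraseFold_items]
      rw [show (PySem.Dict.mk (((PySem.Dict.mk wl).insert "event_data" ((pvAEdFields.foldl (fun d f => d.erase f) (PySem.Dict.mk ((PySem.Dict.mk wl).getD "event_data" []))).items)).items)).items
            = ((PySem.Dict.mk wl).insert "event_data" ((pvAEdFields.foldl (fun d f => d.erase f) (PySem.Dict.mk ((PySem.Dict.mk wl).getD "event_data" []))).items)).items from rfl]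
      rw [pv_winlog_clean_pos wl hwl hed]
      simp only [pv_top_pred]
      norm_num
      decide
    · rw [if_neg hed]
      simp only [pv_contains_mid, pv_getD_mid _ xs ys wl [] hx, if_true]
      rw [pv_insert_mid _ xs ys wl _ hx hy, pv_eraseFold_items]
      rw [show (PySem.Dict.mk (xs ++ ("winlog", ((pvAWlFields.foldl (fun d f => d.erase f) (PySem.Dict.mk wl)).items)) :: ys)).items
            = xs ++ ("winlog", ((pvAWlFields.foldl (fun d f => d.erase f) (PySem.Dict.mk wl)).items)) :: ys from rfl]
      rw [List.filter_append, List.filter_cons, pv_eraseFold_items]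
      rw [show (PySem.Dict.mk wl).items = wl from rfl]
      rw [pv_winlog_clean_neg wl (by simp only [Bool.not_eq_true] at hed; exact hed)]
      simp only [pv_top_pred]
      norm_num
      decide
  · -- no winlog key anywhere
    have hne : ∀ p ∈ event, p.1 ≠ "winlog" := fun p hp hk => hwin (List.mem_map.mpr ⟨p, hp, hk⟩)
    have hcon : (PySem.Dict.mk event).contains "winlog" = false := by
      simp only [PySem.Dict.contains, List.any_eq_false]
      intro p hp
      simpa using hne p hp
    rw [filter_system_log]
    simp only [hcon, Bool.false_and, Bool.false_eq_true, if_false]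
    rw [pv_eraseFold_items]
    rw [filter_system_log_alt, pv_filterMap_no_key "winlog" (fun s => pvTopDrop.contains s) pvCleanWinlog event hne]
    simp only [pv_top_pred]
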